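-- pv_equiv track=rewrite | github.com/R00T-Kim/SCOUT | scripts/run_pair_eval.py | _guess_run_dir_from_stdout
-- ===== SOURCE A (Python) =====
-- def _guess_run_dir_from_stdout(stdout_tail: list[str]) -> str:
--     for line in reversed(stdout_tail):
--         candidate = line.strip()
--         if "aiedge-runs/" not in candidate:
--             continue
--         for tok in reversed(candidate.split()):
--             if "aiedge-runs/" in tok:
--                 return tok.strip().rstrip(",.;:")
--     return ""
-- ===== SOURCE B (Python) =====
-- def _guess_run_dir_from_stdout(stdout_tail: list[str]) -> str:
--     result = ""
--     for line in stdout_tail: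
--         for tok in line.split():
--             if "aiedge-runs/" in tok:
--                 result = tok.rstrip(",.;:")
--     return result
-- ===== Notes on version B (the rewrite author's own statement) =====
-- stated objective: simpler
-- what changed: Replaces the reverse line scan with early return plus a nested reverse token scan by one forward pass that flattens lines into tokens and keeps the last matching token; the strip of the line, the 'substring in line' guard and the redundant tok.strip() all disappear, which is valid because the whitespace-free needle occurs in a line iff it occurs in one of its split() tokens.
import Mathlib
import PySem

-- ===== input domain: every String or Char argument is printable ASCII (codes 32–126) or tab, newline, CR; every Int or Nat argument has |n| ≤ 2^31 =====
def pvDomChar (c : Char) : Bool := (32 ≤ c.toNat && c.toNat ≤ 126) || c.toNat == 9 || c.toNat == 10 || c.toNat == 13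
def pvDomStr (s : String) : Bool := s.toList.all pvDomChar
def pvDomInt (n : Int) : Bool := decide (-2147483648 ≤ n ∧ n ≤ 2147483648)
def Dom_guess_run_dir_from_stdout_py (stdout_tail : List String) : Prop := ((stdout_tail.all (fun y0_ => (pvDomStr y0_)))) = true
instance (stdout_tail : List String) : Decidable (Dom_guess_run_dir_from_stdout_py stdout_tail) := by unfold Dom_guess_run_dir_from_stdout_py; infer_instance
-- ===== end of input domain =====

-- B replaces A's reverse scan (last matching line, then its last matching token) by one
-- forward pass over all tokens keeping the last match; simpler, same cost.

-- s.rstrip(",.;:") — hand port (PySem has no right-only strip with a chars argument);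
-- exact: Python removes the maximal run of trailing characters drawn from the set.
def pyRstripChars (chars : List Char) (s : String) : String :=
  String.ofList ((s.toList.reverse.dropWhile (fun c => chars.contains c)).reverse)

-- ===== PORT A =====
-- inner 'for tok in reversed(candidate.split()): if sub in tok: return …'
def pvGoTokA (toks : List String) : Option String :=
  match toks with
  | [] => none
  | t :: rest =>
    if PySem.Str.isIn "aiedge-runs/" t then
      some (pyRstripChars [',', '.', ';', ':'] (PySem.Str.strip t))
    else pvGoTokA rest

-- outer 'for line in reversed(stdout_tail): …'
def pvGoLineA (lines : List String) : String :=
  match lines with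
  | [] => ""
  | l :: rest =>
    let candidate := PySem.Str.strip l
    if PySem.Str.isIn "aiedge-runs/" candidate then
      match pvGoTokA (PySem.Str.split₀ candidate).reverse with
      | some r => r
      | none => pvGoLineA rest
    else pvGoLineA rest

def guess_run_dir_from_stdout_py (stdout_tail : List String) : String :=
  pvGoLineA stdout_tail.reverse

-- ===== PORT B =====
def guess_run_dir_from_stdout_py_alt (stdout_tail : List String) : String :=
  stdout_tail.foldl
    (fun result line =>
      (PySem.Str.split₀ line).foldl
        (fun r tok =>
          if PySem.Str.isIn "aiedge-runs/" tok then pyRstripChars [',', '.', ';', ':'] tok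
          else r)
        result)
    ""

-- ===== PRECONDITION & SPEC =====
def Spec_guess_run_dir_from_stdout_py (stdout_tail : List String) (out : String) : Prop := out = guess_run_dir_from_stdout_py_alt stdout_tail
instance (stdout_tail : List String) (out : String) : Decidable (Spec_guess_run_dir_from_stdout_py stdout_tail out) := by unfold Spec_guess_run_dir_from_stdout_py; infer_instance

-- ===== CLAIM (what is proved, stated in full; the proofs are below) =====
def Claim_equal_guess_run_dir_from_stdout_py : Prop := ∀ (stdout_tail : List String), Dom_guess_run_dir_from_stdout_py stdout_tail → Spec_guess_run_dir_from_stdout_py stdout_tail (guess_run_dir_from_stdout_py stdout_tail)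

-- ===== LEMMAS AND PROOFS =====

-- Abbreviations used only by the proofs.
def pvNonSp (d : Char) : Bool := !PySem.Chars.isspace d

-- Reference tokenizer: the list of maximal whitespace-free blocks.
def pvWords (s : List Char) : List (List Char) :=
  match s with
  | [] => []
  | c :: rest =>
    if PySem.Chars.isspace c then pvWords rest
    else (c :: rest.takeWhile pvNonSp) :: pvWords (rest.dropWhile pvNonSp)
termination_by s.length
decreasing_by
  · simp
  · have := List.length_dropWhile_le pvNonSp rest
    simp
    omega

theorem pvWords_nil : pvWords [] = [] := by
  rw [pvWords]

theorem pvWords_cons_space {c : Char} (h : PySem.Chars.isspace c) (rest : List Char) :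
    pvWords (c :: rest) = pvWords rest := by
  rw [pvWords]; simp [h]

theorem pvWords_cons_nonspace {c : Char} (h : ¬ PySem.Chars.isspace c) (rest : List Char) :
    pvWords (c :: rest) =
      (c :: rest.takeWhile pvNonSp) :: pvWords (rest.dropWhile pvNonSp) := by
  rw [pvWords]; simp [h]

-- split₀ computes pvWords
theorem pvSplit_go_eq (s : List Char) : ∀ (cur : List Char) (acc : List (List Char)),
    PySem.Chars.split₀.go s cur acc =
      acc.reverse ++
        (if cur = [] then pvWords s
         else (cur.reverse ++ s.takeWhile pvNonSp) :: pvWords (s.dropWhile pvNonSp)) := by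
  induction s with
  | nil =>
    intro cur acc
    by_cases hc : cur = []
    · subst hc; simp [PySem.Chars.split₀.go, pvWords_nil]
    · simp [PySem.Chars.split₀.go, pvWords_nil, hc]
  | cons c rest ih =>
    intro cur acc
    by_cases hsp : PySem.Chars.isspace c
    · by_cases hc : cur = []
      · subst hc
        rw [PySem.Chars.split₀.go]
        simp [hsp, ih [] acc, pvWords_cons_space hsp]
      · rw [PySem.Chars.split₀.go]
        simp only [hsp, if_true, List.isEmpty_iff, if_neg hc]
        rw [ih [] (cur.reverse :: acc)]
        simp [pvWords_cons_space hsp, List.takeWhile_cons, List.dropWhile_cons,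
          pvNonSp, hsp, hc]
    · rw [PySem.Chars.split₀.go]
      simp only [hsp, if_false, List.isEmpty_iff]
      rw [ih (c :: cur) acc]
      by_cases hc : cur = [] <;>
        simp [hc, pvWords_cons_nonspace hsp, List.takeWhile_cons, List.dropWhile_cons,
          pvNonSp, hsp]

theorem pvSplit₀_eq_words (s : List Char) : PySem.Chars.split₀ s = pvWords s := by
  have := pvSplit_go_eq s [] []
  simpa [PySem.Chars.split₀] using this

-- every word is a nonempty whitespace-free infix
theorem pvWords_sound (s : List Char) : ∀ t ∈ pvWords s,
    t ≠ [] ∧ (∀ c ∈ t, ¬ PySem.Chars.isspace c) ∧ t <:+: s := by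
  induction s using pvWords.induct with
  | case1 => simp [pvWords_nil]
  | case2 c rest hsp ih =>
    rw [pvWords_cons_space hsp]
    intro t ht
    obtain ⟨h1, h2, h3⟩ := ih t ht
    exact ⟨h1, h2, h3.trans (List.suffix_cons c rest).isInfix⟩
  | case3 c rest hsp ih =>
    rw [pvWords_cons_nonspace hsp]
    intro t ht
    rcases List.mem_cons.mp ht with h | h
    · subst h
      refine ⟨by simp, ?_, ?_⟩
      · intro x hx
        rcases List.mem_cons.mp hx with h | h
        · subst h; exact hsp
        · have := List.mem_takeWhile_imp h
          simpa [pvNonSp] using this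
      · exact (List.cons_prefix_cons.mpr ⟨rfl, List.takeWhile_prefix _⟩).isInfix
    · obtain ⟨h1, h2, h3⟩ := ih t h
      refine ⟨h1, h2, ?_⟩
      exact (h3.trans (List.dropWhile_suffix _).isInfix).trans
        (List.suffix_cons c rest).isInfix

-- takeWhile/dropWhile helper facts
theorem pvDropWhile_all_id {α : Type} (p : α → Bool) (l : List α) (h : ∀ x ∈ l, ¬ p x) :
    l.dropWhile p = l := by
  cases l with
  | nil => rfl
  | cons a as =>
    rw [List.dropWhile_cons]
    simp [h a (by simp)]

theorem pvTakeWhile_append_all {α : Type} (p : α → Bool) {l₁ : List α} (l₂ : List α)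
    (h : ∀ x ∈ l₁, p x) : (l₁ ++ l₂).takeWhile p = l₁ ++ l₂.takeWhile p := by
  induction l₁ with
  | nil => simp
  | cons a as ih =>
    rw [List.cons_append, List.takeWhile_cons, if_pos (h a (by simp)),
      ih (fun x hx => h x (by simp [hx])), List.cons_append]

theorem pvDropWhile_append_all {α : Type} (p : α → Bool) {l₁ : List α} (l₂ : List α)
    (h : ∀ x ∈ l₁, p x) : (l₁ ++ l₂).dropWhile p = l₂.dropWhile p := by
  induction l₁ with
  | nil => simp
  | cons a as ih =>
    rw [List.cons_append, List.dropWhile_cons, if_pos (h a (by simp))]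
    exact ih (fun x hx => h x (by simp [hx]))

theorem pvTakeDropWhile_space (sp : List Char) (hsp : ∀ c ∈ sp, PySem.Chars.isspace c) :
    sp.takeWhile pvNonSp = [] ∧ sp.dropWhile pvNonSp = sp := by
  cases sp with
  | nil => simp
  | cons a as =>
    have hna : pvNonSp a = false := by simp [pvNonSp, hsp a (by simp)]
    rw [List.takeWhile_cons, List.dropWhile_cons]
    simp [hna]

theorem pvTakeDropWhile_append {α : Type} (p : α → Bool) (l₁ l₂ : List α)
    (h : l₁.dropWhile p ≠ []) :
    (l₁ ++ l₂).takeWhile p = l₁.takeWhile p ∧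
      (l₁ ++ l₂).dropWhile p = l₁.dropWhile p ++ l₂ := by
  induction l₁ with
  | nil => simp at h
  | cons a as ih =>
    by_cases hp : p a = true
    · rw [List.dropWhile_cons, if_pos hp] at h
      obtain ⟨h1, h2⟩ := ih h
      constructor
      · rw [List.cons_append, List.takeWhile_cons, if_pos hp, h1,
          List.takeWhile_cons, if_pos hp]
      · rw [List.cons_append, List.dropWhile_cons, if_pos hp, h2,
          List.dropWhile_cons, if_pos hp]
    · constructor
      · rw [List.cons_append, List.takeWhile_cons, if_neg hp,
          List.takeWhile_cons, if_neg hp]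
      · rw [List.cons_append, List.dropWhile_cons, if_neg hp,
          List.dropWhile_cons, if_neg hp, List.cons_append]

-- appending trailing whitespace does not change the words
theorem pvWords_space_nil (sp : List Char) (hsp : ∀ c ∈ sp, PySem.Chars.isspace c) :
    pvWords sp = [] := by
  induction sp with
  | nil => exact pvWords_nil
  | cons c rest ih =>
    rw [pvWords_cons_space (hsp c (by simp))]
    exact ih (fun x hx => hsp x (by simp [hx]))

theorem pvWords_append_space (sp : List Char) (hsp : ∀ c ∈ sp, PySem.Chars.isspace c) :
    ∀ s : List Char, pvWords (s ++ sp) = pvWords s := by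
  intro s
  induction s using pvWords.induct with
  | case1 =>
    rw [List.nil_append, pvWords_nil]
    exact pvWords_space_nil sp hsp
  | case2 c rest hsp' ih =>
    rw [List.cons_append, pvWords_cons_space hsp', pvWords_cons_space hsp']
    exact ih
  | case3 c rest hsp' ih =>
    rw [List.cons_append, pvWords_cons_nonspace hsp', pvWords_cons_nonspace hsp']
    by_cases hd : rest.dropWhile pvNonSp = []
    · have hall : ∀ x ∈ rest, pvNonSp x := by
        intro x hx
        exact List.dropWhile_eq_nil_iff.mp hd x hx
      have htake : rest.takeWhile pvNonSp = rest := List.takeWhile_eq_self_iff.mpr hall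
      obtain ⟨hts, hds⟩ := pvTakeDropWhile_space sp hsp
      have htake2 : (rest ++ sp).takeWhile pvNonSp = rest := by
        rw [pvTakeWhile_append_all pvNonSp sp hall, hts, List.append_nil]
      have hdrop2 : (rest ++ sp).dropWhile pvNonSp = sp := by
        rw [pvDropWhile_append_all pvNonSp sp hall, hds]
      rw [htake2, hdrop2, htake, hd, pvWords_nil, pvWords_space_nil sp hsp]
    · obtain ⟨h1, h2⟩ := pvTakeDropWhile_append pvNonSp rest sp hd
      rw [h1, h2, ih]

theorem pvWords_lstrip (s : List Char) : pvWords (PySem.Chars.lstrip s) = pvWords s := by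
  unfold PySem.Chars.lstrip
  induction s with
  | nil => simp
  | cons c rest ih =>
    by_cases hsp : PySem.Chars.isspace c
    · rw [List.dropWhile_cons, pvWords_cons_space hsp]
      simp [hsp, ih]
    · rw [List.dropWhile_cons]
      simp [hsp]

theorem pvWords_rstrip (s : List Char) : pvWords (PySem.Chars.rstrip s) = pvWords s := by
  unfold PySem.Chars.rstrip
  have hdecomp : s = (s.reverse.dropWhile PySem.Chars.isspace).reverse ++
      (s.reverse.takeWhile PySem.Chars.isspace).reverse := by
    conv_lhs => rw [← s.reverse_reverse, ← List.takeWhile_append_dropWhile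
      (p := PySem.Chars.isspace) (l := s.reverse)]
    rw [List.reverse_append]
  conv_rhs => rw [hdecomp]
  rw [pvWords_append_space]
  intro c hc
  rw [List.mem_reverse] at hc
  exact List.mem_takeWhile_imp hc

theorem pvWords_strip (s : List Char) : pvWords (PySem.Chars.strip s) = pvWords s := by
  unfold PySem.Chars.strip
  rw [pvWords_rstrip, pvWords_lstrip]

-- strip is the identity on whitespace-free strings
theorem pvStrip_id (t : List Char) (h : ∀ c ∈ t, ¬ PySem.Chars.isspace c) :
    PySem.Chars.strip t = t := by
  unfold PySem.Chars.strip PySem.Chars.lstrip PySem.Chars.rstrip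
  rw [pvDropWhile_all_id _ t h,
    pvDropWhile_all_id _ t.reverse (fun x hx => h x (List.mem_reverse.mp hx))]
  exact t.reverse_reverse

-- last-match accumulator over the token list, at Option level
def pvLast? (toks : List String) : Option String :=
  toks.foldl
    (fun o t => if PySem.Str.isIn "aiedge-runs/" t then
        some (pyRstripChars [',', '.', ';', ':'] t) else o)
    none

theorem pvFoldl_opt (toks : List String) : ∀ (o : Option String) (res : String),
    toks.foldl
      (fun r tok => if PySem.Str.isIn "aiedge-runs/" tok then
          pyRstripChars [',', '.', ';', ':'] tok else r)
      (o.getD res) =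
    (toks.foldl
      (fun o t => if PySem.Str.isIn "aiedge-runs/" t then
          some (pyRstripChars [',', '.', ';', ':'] t) else o)
      o).getD res := by
  induction toks with
  | nil => intro o res; rfl
  | cons t ts ih =>
    intro o res
    rw [List.foldl_cons, List.foldl_cons]
    by_cases hm : PySem.Str.isIn "aiedge-runs/" t = true
    · rw [if_pos hm, if_pos hm]
      exact ih (some (pyRstripChars [',', '.', ';', ':'] t)) res
    · rw [if_neg hm, if_neg hm]
      exact ih o res

theorem pvFoldl_getD (toks : List String) (res : String) :
    toks.foldl
      (fun r tok => if PySem.Str.isIn "aiedge-runs/" tok then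
          pyRstripChars [',', '.', ';', ':'] tok else r)
      res = (pvLast? toks).getD res := by
  have := pvFoldl_opt toks none res
  simpa [pvLast?] using this

theorem pvLast?_append (toks : List String) (t : String) :
    pvLast? (toks ++ [t]) =
      if PySem.Str.isIn "aiedge-runs/" t then
        some (pyRstripChars [',', '.', ';', ':'] t) else pvLast? toks := by
  simp [pvLast?, List.foldl_append]

theorem pvGoTokA_reverse (toks : List String)
    (hs : ∀ t ∈ toks, PySem.Str.strip t = t) :
    pvGoTokA toks.reverse = pvLast? toks := by
  induction toks using List.reverseRecOn with
  | nil => simp [pvGoTokA, pvLast?]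
  | append_singleton ys x ih =>
    rw [List.reverse_append, List.reverse_singleton, List.singleton_append, pvLast?_append]
    simp only [pvGoTokA]
    by_cases hm : PySem.Str.isIn "aiedge-runs/" x = true
    · rw [if_pos hm, if_pos hm, hs x (by simp)]
    · rw [if_neg hm, if_neg hm]
      exact ih (fun t ht => hs t (by simp [ht]))

theorem pvLast?_none (toks : List String)
    (h : ∀ t ∈ toks, ¬ PySem.Str.isIn "aiedge-runs/" t = true) : pvLast? toks = none := by
  induction toks using List.reverseRecOn with
  | nil => rfl
  | append_singleton ys x ih =>
    rw [pvLast?_append, if_neg (h x (by simp))]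
    exact ih (fun t ht => h t (by simp [ht]))

theorem pvToks_eq (l : String) :
    PySem.Str.split₀ (PySem.Str.strip l) = PySem.Str.split₀ l := by
  simp only [PySem.Str.split₀]
  rw [PySem.Str.toList_strip, pvSplit₀_eq_words, pvSplit₀_eq_words, pvWords_strip]

theorem pvTok_strip_id (l : String) (t : String) (ht : t ∈ PySem.Str.split₀ l) :
    PySem.Str.strip t = t := by
  simp only [PySem.Str.split₀, pvSplit₀_eq_words, List.mem_map] at ht
  obtain ⟨w, hw, rfl⟩ := ht
  obtain ⟨-, hns, -⟩ := pvWords_sound l.toList w hw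
  have hlist : (String.ofList w).toList = w := by simp
  simp only [PySem.Str.strip, hlist, pvStrip_id w hns]

-- per-line agreement: A's guarded reverse token scan = B's forward token fold, as options
theorem pvPerLine (l : String) :
    (if PySem.Str.isIn "aiedge-runs/" (PySem.Str.strip l) then
       pvGoTokA (PySem.Str.split₀ (PySem.Str.strip l)).reverse
     else none) = pvLast? (PySem.Str.split₀ l) := by
  by_cases hg : PySem.Str.isIn "aiedge-runs/" (PySem.Str.strip l) = true
  · rw [if_pos hg, pvToks_eq]
    exact pvGoTokA_reverse _ (fun t ht => pvTok_strip_id l t ht)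
  · rw [if_neg hg]
    refine (pvLast?_none _ ?_).symm
    intro t ht hm
    apply hg
    rw [PySem.Str.isIn_iff_infix] at hm ⊢
    rw [PySem.Str.toList_strip]
    have ht' := ht
    simp only [PySem.Str.split₀, pvSplit₀_eq_words, List.mem_map] at ht'
    obtain ⟨w, hw, rfl⟩ := ht'
    rw [← pvWords_strip l.toList] at hw
    obtain ⟨-, -, hinf⟩ := pvWords_sound _ w hw
    have hlw : (String.ofList w).toList = w := by simp
    rw [hlw] at hm
    exact hm.trans hinf

-- option-valued view of A's outer loop
def pvGoLineA? (lines : List String) : Option String :=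
  match lines with
  | [] => none
  | l :: rest =>
    let candidate := PySem.Str.strip l
    if PySem.Str.isIn "aiedge-runs/" candidate then
      match pvGoTokA (PySem.Str.split₀ candidate).reverse with
      | some r => some r
      | none => pvGoLineA? rest
    else pvGoLineA? rest

theorem pvGoLineA_eq_getD (lines : List String) :
    pvGoLineA lines = (pvGoLineA? lines).getD "" := by
  induction lines with
  | nil => rfl
  | cons l rest ih =>
    simp only [pvGoLineA, pvGoLineA?]
    by_cases hg : PySem.Str.isIn "aiedge-runs/" (PySem.Str.strip l) = true
    · rw [if_pos hg, if_pos hg]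
      cases pvGoTokA (PySem.Str.split₀ (PySem.Str.strip l)).reverse with
      | some r => rfl
      | none => exact ih
    · rw [if_neg hg, if_neg hg]
      exact ih

theorem pvGoLineA?_cons (l : String) (rest : List String) :
    pvGoLineA? (l :: rest) =
      ((if PySem.Str.isIn "aiedge-runs/" (PySem.Str.strip l) then
         pvGoTokA (PySem.Str.split₀ (PySem.Str.strip l)).reverse
       else none)).orElse (fun _ => pvGoLineA? rest) := by
  simp only [pvGoLineA?]
  by_cases hg : PySem.Str.isIn "aiedge-runs/" (PySem.Str.strip l) = true
  · rw [if_pos hg, if_pos hg]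
    cases pvGoTokA (PySem.Str.split₀ (PySem.Str.strip l)).reverse <;> rfl
  · rw [if_neg hg, if_neg hg]
    rfl

-- outer loops agree
theorem pvOuter (xs : List String) : ∀ (res : String),
    xs.foldl
      (fun result line =>
        (PySem.Str.split₀ line).foldl
          (fun r tok =>
            if PySem.Str.isIn "aiedge-runs/" tok then pyRstripChars [',', '.', ';', ':'] tok
            else r)
          result)
      res = (match pvGoLineA? xs.reverse with | some v => v | none => res) := by
  induction xs using List.reverseRecOn with
  | nil => intro res; rfl
  | append_singleton ys x ih =>
    intro res
    rw [List.foldl_append, List.reverse_append]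
    simp only [List.reverse_cons, List.reverse_nil, List.nil_append, List.singleton_append,
      List.foldl_cons, List.foldl_nil]
    rw [pvGoLineA?_cons, pvPerLine, pvFoldl_getD]
    cases pvLast? (PySem.Str.split₀ x) with
    | some v => rfl
    | none => exact ih res

-- ===== VERDICT (by name: the statement is the Claim_ definition above) =====
theorem guess_run_dir_from_stdout_py_spec : Claim_equal_guess_run_dir_from_stdout_py := by
  intro xs _
  unfold Spec_guess_run_dir_from_stdout_py
  unfold guess_run_dir_from_stdout_py guess_run_dir_from_stdout_py_alt
  rw [pvGoLineA_eq_getD, pvOuter]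
  cases pvGoLineA? xs.reverse <;> rfl
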